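-- pv_equiv track=rewrite | github.com/im-jonathan/hackerRankProblemSolving | strings/weightedUniformStrings.py | weightedUniformStrings
-- ===== SOURCE A (Python) =====
-- def weightedUniformStrings(s: str, queries: list) -> list:
--     # Write your code here
--     a = ord(s[0])-96
--     leng = set()
--     s = s+"_"
--     for i in range(1, len(s)):
--         leng.add(a)
--         if s[i] == s[i-1]:
--             a += (ord(s[i])-96)
--         else:
--             a = (ord(s[i])-96)
--     return ["Yes" if i in leng else "No" for i in queries]
-- ===== SOURCE B (Python) =====
-- def weightedUniformStrings(s: str, queries: list) -> list:
--     # two-pointer run scan keeping only the MAXIMAL run length per character,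
--     # then answer each query by divisibility arithmetic over that small table
--     # (no set of achievable weights is ever built)
--     best = {}
--     i, n = 0, len(s)
--     while i < n:
--         j = i
--         while j < n and s[j] == s[i]:
--             j += 1
--         c = s[i]
--         if j - i > best.get(c, 0):
--             best[c] = j - i
--         i = j
--
--     def achievable(q):
--         for c, L in best.items():
--             v = ord(c) - 96
--             if v == 0:
--                 if q == 0:
--                     return True
--             elif q % v == 0 and 1 <= q // v <= L:
--                 return True
--         return False
--
--     return ["Yes" if achievable(q) else "No" for q in queries]
-- ===== Notes on version B (the rewrite author's own statement) =====
-- stated objective: alternative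
-- what changed: Instead of A's single accumulating scan that materialises the set of all achievable weights and answers queries by set membership, B run-length encodes s with a two-pointer scan keeping only the maximal run length per character and answers each query arithmetically: q is achievable iff some table entry (c, L) has v = ord(c)-96 dividing q with 1 <= q//v <= L; no weight set is ever built.
import Mathlib
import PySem

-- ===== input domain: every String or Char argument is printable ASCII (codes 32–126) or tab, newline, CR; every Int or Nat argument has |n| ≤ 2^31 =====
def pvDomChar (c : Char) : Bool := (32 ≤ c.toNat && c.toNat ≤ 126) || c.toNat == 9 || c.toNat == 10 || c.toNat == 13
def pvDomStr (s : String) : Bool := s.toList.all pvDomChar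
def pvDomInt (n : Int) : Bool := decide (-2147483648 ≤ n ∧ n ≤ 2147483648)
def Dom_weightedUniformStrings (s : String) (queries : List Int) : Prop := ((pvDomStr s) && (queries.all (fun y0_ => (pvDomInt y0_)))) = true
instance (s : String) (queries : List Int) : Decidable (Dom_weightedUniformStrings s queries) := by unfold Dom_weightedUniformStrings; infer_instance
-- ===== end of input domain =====

-- B replaces A's accumulating scan that materialises the set of achievable weights by a
-- run-length encoding plus a per-query divisibility test over the runs (no weight set).
-- Objective: alternative algorithm, same return values on nonempty s.

-- ===== PORT A =====
-- the loop 'for i in range(1, len(s))' of A, carried as (previous char, remaining chars, a, leng)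
def wA_loop : Char → List Char → Int → PySem.Set Int → PySem.Set Int
  | _, [], _, leng => leng
  | prev, c :: rest, a, leng =>
      let leng' := PySem.Set.add leng a
      let a' := if c == prev then a + ((c.toNat : Int) - 96) else ((c.toNat : Int) - 96)
      wA_loop c rest a' leng'

def weightedUniformStrings (s : String) (queries : List Int) : List String :=
  match s.toList with
  | [] => []   -- Python raises IndexError here (ord(s[0])); excluded by Pre_
  | c :: rest =>
      let leng := wA_loop c (rest ++ ['_']) ((c.toNat : Int) - 96) PySem.Set.empty
      queries.map (fun q => if PySem.Set.contains leng q then "Yes" else "No")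

-- ===== PORT B =====
-- the two-pointer while loop of Source B: the inner 'while j < n and s[j] == s[i]' is the
-- takeWhile/dropWhile split of the remaining characters; best keeps the maximal run
-- length seen per character
def wB_runs : List Char → PySem.Dict Char Int → PySem.Dict Char Int
  | [], best => best
  | c :: rest, best =>
      let L : Int := ((rest.takeWhile (fun d => d == c)).length : Int) + 1
      let best' := if best.getD c 0 < L then best.insert c L else best
      wB_runs (rest.dropWhile (fun d => d == c)) best'
termination_by l => l.length
decreasing_by
  simp only [List.length_cons]
  exact Nat.lt_succ_of_le (List.length_dropWhile_le _ _)

-- Source B's 'achievable(q)': first table entry passing the divisibility test returns True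
def wB_ach (q : Int) : List (Char × Int) → Bool
  | [] => false
  | (c, L) :: t =>
      let v : Int := (c.toNat : Int) - 96
      if v = 0 then (if q = 0 then true else wB_ach q t)
      else if PySem.Int.mod q v = 0 ∧ 1 ≤ PySem.Int.floordiv q v ∧ PySem.Int.floordiv q v ≤ L
      then true
      else wB_ach q t

def weightedUniformStrings_alt (s : String) (queries : List Int) : List String :=
  let best := wB_runs s.toList PySem.Dict.empty
  queries.map (fun q => if wB_ach q best.items then "Yes" else "No")

-- ===== PRECONDITION & SPEC =====
-- A evaluates ord(s[0]) and raises IndexError on the empty string; Pre_ excludes exactly that.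
def Pre_weightedUniformStrings (s : String) (queries : List Int) : Prop := s ≠ ""
instance (s : String) (queries : List Int) : Decidable (Pre_weightedUniformStrings s queries) := by unfold Pre_weightedUniformStrings; infer_instance
def pvWitness_weightedUniformStrings : String × List Int := ("abbcc", [1, 4, 5, 3])

def Spec_weightedUniformStrings (s : String) (queries : List Int) (out : List String) : Prop := out = weightedUniformStrings_alt s queries
instance (s : String) (queries : List Int) (out : List String) : Decidable (Spec_weightedUniformStrings s queries out) := by unfold Spec_weightedUniformStrings; infer_instance

-- ===== CLAIM (what is proved, stated in full; the proofs are below) =====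
def Claim_equal_weightedUniformStrings : Prop := ∀ (s : String) (queries : List Int), Dom_weightedUniformStrings s queries → Pre_weightedUniformStrings s queries → Spec_weightedUniformStrings s queries (weightedUniformStrings s queries)

-- ===== LEMMAS AND PROOFS =====

-- the values A's scan adds from state (prev, a) over the remaining chars l (sentinel already removed)
def contribA (prev : Char) (a : Int) : List Char → List Int
  | [] => [a]
  | c :: rest =>
      if c = prev then a :: contribA c (a + ((c.toNat : Int) - 96)) rest
      else a :: contribA c ((c.toNat : Int) - 96) rest

-- run-length encoding with Nat lengths (proof-side; back-to-front recursion)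
def runsB : List Char → List (Char × Nat)
  | [] => []
  | c :: rest =>
    match runsB rest with
    | (c', n) :: t => if c == c' then (c, n+1) :: t else (c, 1) :: (c', n) :: t
    | [] => [(c, 1)]

-- all weights of uniform substrings, per run
def multsB (rs : List (Char × Nat)) : List Int :=
  rs.flatMap (fun p => (List.range p.2).map (fun k => ((k : Int) + 1) * ((p.1.toNat : Int) - 96)))

theorem mem_wA_loop (l : List Char) : ∀ (prev : Char) (a : Int) (leng : PySem.Set Int) (x : Int),
    x ∈ wA_loop prev (l ++ ['_']) a leng ↔ x ∈ leng ∨ x ∈ contribA prev a l := by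
  induction l with
  | nil =>
      intro prev a leng x
      simp [wA_loop, contribA, PySem.Set.mem_add]
  | cons c rest ih =>
      intro prev a leng x
      by_cases h : c = prev
      · subst h
        simp [wA_loop, contribA, ih, PySem.Set.mem_add]
        tauto
      · have hb : (c == prev) = false := by simp [h]
        simp [wA_loop, contribA, hb, h, ih, PySem.Set.mem_add]
        tauto

theorem runsB_head_char (l : List Char) (c : Char) (n : Nat) (t : List (Char × Nat))
    (h : runsB l = (c, n) :: t) : l.head? = some c := by
  cases l with
  | nil => simp [runsB] at h
  | cons d rest =>
      simp only [runsB] at h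
      rcases hr : runsB rest with _ | ⟨⟨c', m⟩, t'⟩ <;> rw [hr] at h
      · simp at h; simp [h.1]
      · by_cases hd : d == c' <;> simp [hd] at h <;> simp [h.1.1]

theorem runsB_replicate_append (m : Nat) (c : Char) (l : List Char)
    (hl : l.head? = none ∨ ∀ d, l.head? = some d → ¬ (c == d)) :
    runsB (List.replicate (m + 1) c ++ l) = (c, m + 1) :: runsB l := by
  induction m with
  | zero =>
      simp only [List.replicate, List.nil_append, List.cons_append, runsB]
      rcases hr : runsB l with _ | ⟨⟨c', n⟩, t⟩
      · rfl
      · have hc' := runsB_head_char l c' n t hr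
        rcases hl with h0 | h1
        · rw [h0] at hc'; cases hc'
        · have := h1 c' hc'
          simp [this]
  | succ k ih =>
      have : List.replicate (k + 1 + 1) c ++ l = c :: (List.replicate (k + 1) c ++ l) := by
        simp [List.replicate]
      rw [this]
      simp only [runsB, ih]
      simp

theorem mem_multsB_cons (c : Char) (n : Nat) (t : List (Char × Nat)) (x : Int) :
    x ∈ multsB ((c, n) :: t) ↔ (∃ k : Nat, k < n ∧ x = ((k : Int) + 1) * ((c.toNat : Int) - 96)) ∨ x ∈ multsB t := by
  simp [multsB]
  constructor
  · rintro (⟨k, hk, hx⟩ | h)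
    · exact Or.inl ⟨k, hk, hx.symm⟩
    · exact Or.inr h
  · rintro (⟨k, hk, hx⟩ | h)
    · exact Or.inl ⟨k, hk, hx.symm⟩
    · exact Or.inr h

-- core correspondence: A's contributions from mid-run state, plus the lower multiples already
-- emitted, are exactly the uniform-substring weights of the string re-completed with the run prefix
theorem contribA_runs (l : List Char) : ∀ (c : Char) (m : Nat) (x : Int),
    (x ∈ contribA c (((m : Int) + 1) * ((c.toNat : Int) - 96)) l ∨
      (∃ k : Nat, k < m ∧ x = ((k : Int) + 1) * ((c.toNat : Int) - 96))) ↔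
    x ∈ multsB (runsB (List.replicate (m + 1) c ++ l)) := by
  induction l with
  | nil =>
      intro c m x
      rw [runsB_replicate_append m c [] (Or.inl rfl), mem_multsB_cons]
      simp only [contribA, List.mem_singleton, runsB, multsB, List.flatMap_nil,
        List.not_mem_nil, or_false]
      constructor
      · rintro (hx | ⟨k, hk, hx⟩)
        · exact ⟨m, Nat.lt_succ_self m, hx⟩
        · exact ⟨k, Nat.lt_succ_of_lt hk, hx⟩
      · rintro ⟨k, hk, hx⟩
        rcases Nat.lt_or_ge k m with h | h
        · exact Or.inr ⟨k, h, hx⟩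
        · have hkm : k = m := by omega
          subst hkm
          exact Or.inl hx
  | cons d rest ih =>
      intro c m x
      by_cases hd : d = c
      · subst hd
        have hrepl : List.replicate (m + 1) d ++ d :: rest = List.replicate (m + 1 + 1) d ++ rest := by
          simp [List.replicate_succ']
        rw [hrepl, ← ih d (m + 1) x]
        simp only [contribA, if_true]
        have harith : ((m : Int) + 1) * ((d.toNat : Int) - 96) + ((d.toNat : Int) - 96)
            = (((m + 1 : Nat) : Int) + 1) * ((d.toNat : Int) - 96) := by push_cast; ring
        rw [harith, List.mem_cons]
        constructor
        · rintro ((hx | h') | ⟨k, hk, hx⟩)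
          · exact Or.inr ⟨m, by omega, hx⟩
          · exact Or.inl h'
          · exact Or.inr ⟨k, by omega, hx⟩
        · rintro (h | ⟨k, hk, hx⟩)
          · exact Or.inl (Or.inr h)
          · rcases Nat.lt_or_ge k m with h' | h'
            · exact Or.inr ⟨k, h', hx⟩
            · have hkm : k = m := by omega
              subst hkm
              exact Or.inl (Or.inl hx)
      · have hside : ∀ e, (d :: rest).head? = some e → ¬ (c == e) := by
          intro e he
          simp only [List.head?_cons, Option.some.injEq] at he
          subst he
          simp only [beq_iff_eq]
          exact fun h => hd h.symm
        rw [runsB_replicate_append m c (d :: rest) (Or.inr hside), mem_multsB_cons]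
        simp only [contribA, if_neg hd]
        have hrest := ih d 0 x
        rw [show (0:Nat) + 1 = 1 from rfl, List.replicate_one, List.singleton_append] at hrest
        rw [show (((0:Nat):Int) + 1) * ((d.toNat : Int) - 96) = (d.toNat : Int) - 96 by norm_num] at hrest
        have hrest' : x ∈ contribA d ((d.toNat : Int) - 96) rest ↔ x ∈ multsB (runsB (d :: rest)) := by
          rw [← hrest]
          constructor
          · exact Or.inl
          · rintro (h | ⟨k, hk, _⟩)
            · exact h
            · exact absurd hk (Nat.not_lt_zero k)
        rw [List.mem_cons]
        constructor
        · rintro ((hx | h') | ⟨k, hk, hx⟩)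
          · exact Or.inl ⟨m, by omega, hx⟩
          · exact Or.inr (hrest'.mp h')
          · exact Or.inl ⟨k, by omega, hx⟩
        · rintro (⟨k, hk, hx⟩ | h)
          · rcases Nat.lt_or_ge k m with h' | h'
            · exact Or.inr ⟨k, h', hx⟩
            · have hkm : k = m := by omega
              subst hkm
              exact Or.inl (Or.inl hx)
          · exact Or.inl (Or.inr (hrest'.mpr h))

-- the first character surviving dropWhile fails the predicate
theorem head?_dropWhile_false (p : Char → Bool) (l : List Char) (d : Char)
    (h : (l.dropWhile p).head? = some d) : p d = false := by
  induction l with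
  | nil => simp at h
  | cons a t ih =>
      rw [List.dropWhile_cons] at h
      by_cases hp : p a
      · simp [hp] at h; exact ih h
      · simp [hp] at h; subst h; simpa using hp

-- the run-length encoding peels off the first maximal run
theorem runsB_cons_eq (c : Char) (rest : List Char) :
    runsB (c :: rest)
      = (c, (rest.takeWhile (fun d => d == c)).length + 1)
          :: runsB (rest.dropWhile (fun d => d == c)) := by
  have htake : rest.takeWhile (fun d => d == c)
      = List.replicate (rest.takeWhile (fun d => d == c)).length c := by
    apply List.eq_replicate_of_mem
    intro b hb
    have := List.mem_takeWhile_imp hb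
    exact eq_of_beq this
  have hsplit : c :: rest
      = List.replicate ((rest.takeWhile (fun d => d == c)).length + 1) c
          ++ rest.dropWhile (fun d => d == c) := by
    conv_lhs => rw [← List.takeWhile_append_dropWhile (p := fun d => d == c) (l := rest)]
    rw [List.replicate_succ, List.cons_append]
    congr 1
    rw [← htake]
  have hside : (rest.dropWhile (fun d => d == c)).head? = none ∨
      ∀ d, (rest.dropWhile (fun d => d == c)).head? = some d → ¬ (c == d) := by
    rcases hh : (rest.dropWhile (fun d => d == c)).head? with _ | d
    · exact Or.inl rfl
    · refine Or.inr fun e he => ?_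
      obtain rfl : d = e := Option.some.inj he
      have hfalse : (d == c) = false := head?_dropWhile_false (fun d => d == c) rest d hh
      simp only [beq_eq_false_iff_ne, ne_eq] at hfalse
      simp only [beq_iff_eq]
      exact fun h => hfalse h.symm
  rw [hsplit, runsB_replicate_append _ _ _ hside]

-- the per-entry test Source B's achievable() applies to a table entry (c, L)
def wCond (c : Char) (L : Int) (q : Int) : Prop :=
  ((c.toNat : Int) - 96 = 0 ∧ q = 0) ∨
  ((c.toNat : Int) - 96 ≠ 0 ∧ PySem.Int.mod q ((c.toNat : Int) - 96) = 0 ∧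
    1 ≤ PySem.Int.floordiv q ((c.toNat : Int) - 96) ∧
    PySem.Int.floordiv q ((c.toNat : Int) - 96) ≤ L)

theorem wB_ach_iff_exists (q : Int) (ps : List (Char × Int)) :
    wB_ach q ps = true ↔ ∃ p ∈ ps, wCond p.1 p.2 q := by
  induction ps with
  | nil => simp [wB_ach]
  | cons p t ih =>
      obtain ⟨c, L⟩ := p
      simp only [wB_ach]
      by_cases hv0 : ((c.toNat : Int) - 96) = 0
      · rw [if_pos hv0]
        by_cases hq0 : q = 0
        · rw [if_pos hq0]
          simp only [true_iff]
          exact ⟨(c, L), List.mem_cons_self, Or.inl ⟨hv0, hq0⟩⟩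
        · rw [if_neg hq0, ih]
          constructor
          · rintro ⟨p, hp, hc⟩
            exact ⟨p, List.mem_cons_of_mem _ hp, hc⟩
          · rintro ⟨p, hp, hc⟩
            rcases List.mem_cons.mp hp with rfl | hp'
            · rcases hc with ⟨_, hq⟩ | ⟨hne, _⟩
              · exact absurd hq hq0
              · exact absurd hv0 hne
            · exact ⟨p, hp', hc⟩
      · rw [if_neg hv0]
        by_cases hc : PySem.Int.mod q ((c.toNat : Int) - 96) = 0 ∧
            1 ≤ PySem.Int.floordiv q ((c.toNat : Int) - 96) ∧
            PySem.Int.floordiv q ((c.toNat : Int) - 96) ≤ L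
        · rw [if_pos hc]
          simp only [true_iff]
          exact ⟨(c, L), List.mem_cons_self, Or.inr ⟨hv0, hc.1, hc.2.1, hc.2.2⟩⟩
        · rw [if_neg hc, ih]
          constructor
          · rintro ⟨p, hp, hcp⟩
            exact ⟨p, List.mem_cons_of_mem _ hp, hcp⟩
          · rintro ⟨p, hp, hcp⟩
            rcases List.mem_cons.mp hp with rfl | hp'
            · rcases hcp with ⟨hv, _⟩ | ⟨_, h1, h2, h3⟩
              · exact absurd hv hv0
              · exact absurd ⟨h1, h2, h3⟩ hc
            · exact ⟨p, hp', hcp⟩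

-- wCond at a positive bound L is exactly 'q is a multiple k·v with 1 ≤ k ≤ L'
theorem wCond_iff (c : Char) (L : Int) (hL : 1 ≤ L) (q : Int) :
    wCond c L q ↔ ∃ k : Nat, (k : Int) < L ∧ q = ((k : Int) + 1) * ((c.toNat : Int) - 96) := by
  unfold wCond
  by_cases hv0 : ((c.toNat : Int) - 96) = 0
  · constructor
    · rintro (⟨_, hq0⟩ | ⟨hne, _⟩)
      · exact ⟨0, by omega, by rw [hq0, hv0]; ring⟩
      · exact absurd hv0 hne
    · rintro ⟨k, _, hx⟩
      exact Or.inl ⟨hv0, by rw [hx, hv0]; ring⟩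
  · constructor
    · rintro (⟨hv, _⟩ | ⟨_, hm, h1, h2⟩)
      · exact absurd hv hv0
      · have hq : PySem.Int.floordiv q ((c.toNat : Int) - 96) * ((c.toNat : Int) - 96) = q := by
          have h := PySem.Int.floordiv_mul_add_mod q ((c.toNat : Int) - 96)
          rw [hm] at h
          simpa using h
        have hfd1 : (((PySem.Int.floordiv q ((c.toNat : Int) - 96) - 1).toNat : Int) + 1)
            = PySem.Int.floordiv q ((c.toNat : Int) - 96) := by omega
        refine ⟨(PySem.Int.floordiv q ((c.toNat : Int) - 96) - 1).toNat, by omega, ?_⟩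
        rw [hfd1]
        exact hq.symm
    · rintro ⟨k, hk, hx⟩
      have hdvd : ((c.toNat : Int) - 96) ∣ q := ⟨(k : Int) + 1, by rw [hx]; ring⟩
      have hm : PySem.Int.mod q ((c.toNat : Int) - 96) = 0 :=
        (PySem.Int.mod_eq_zero_iff_dvd q _).mpr hdvd
      have hq : PySem.Int.floordiv q ((c.toNat : Int) - 96) * ((c.toNat : Int) - 96) = q := by
        have h := PySem.Int.floordiv_mul_add_mod q ((c.toNat : Int) - 96)
        rw [hm] at h
        simpa using h
      have hfd : PySem.Int.floordiv q ((c.toNat : Int) - 96) = (k : Int) + 1 := by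
        apply mul_right_cancel₀ hv0
        rw [hq, hx]
      exact Or.inr ⟨hv0, hm, by omega, by omega⟩

theorem wCond_mono (c : Char) (L L' q : Int) (h : L ≤ L') (hc : wCond c L q) : wCond c L' q := by
  rcases hc with h0 | ⟨hv, hm, h1, h2⟩
  · exact Or.inl h0
  · exact Or.inr ⟨hv, hm, h1, by omega⟩

-- key invariant: some table entry passes the test iff some one did already or q is an
-- achievable uniform-substring weight of the remaining characters
theorem wB_runs_cond_aux (n : Nat) : ∀ (l : List Char), l.length ≤ n →
    ∀ (d : PySem.Dict Char Int) (q : Int),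
    d.keys.Nodup →
    ((∃ p ∈ (wB_runs l d).items, wCond p.1 p.2 q) ↔
      (∃ p ∈ d.items, wCond p.1 p.2 q) ∨ q ∈ multsB (runsB l)) := by
  induction n with
  | zero =>
      intro l hl d q _
      have : l = [] := List.eq_nil_of_length_eq_zero (Nat.le_zero.mp hl)
      subst this
      simp [wB_runs, runsB, multsB]
  | succ n ihn =>
      intro l hl d q hnd
      match l with
      | [] => simp [wB_runs, runsB, multsB]
      | c :: rest =>
      have ih : ∀ (d' : PySem.Dict Char Int), d'.keys.Nodup →
          ((∃ p ∈ (wB_runs (rest.dropWhile (fun d => d == c)) d').items, wCond p.1 p.2 q) ↔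
            (∃ p ∈ d'.items, wCond p.1 p.2 q) ∨
              q ∈ multsB (runsB (rest.dropWhile (fun d => d == c)))) := by
        intro d' hnd'
        exact ihn (rest.dropWhile (fun d => d == c))
          (by
            have h1 := List.length_dropWhile_le (fun d => d == c) rest
            simp only [List.length_cons] at hl
            omega) d' q hnd'
      rw [runsB_cons_eq, mem_multsB_cons]
      simp only [wB_runs]
      by_cases hins : d.getD c 0 < ((rest.takeWhile (fun d => d == c)).length : Int) + 1
      · rw [if_pos hins]
        rw [ih (d.insert c (((rest.takeWhile (fun d => d == c)).length : Int) + 1))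
          (PySem.Dict.nodup_keys_insert d _ _ hnd)]
        have hLpos : (1 : Int) ≤ ((rest.takeWhile (fun d => d == c)).length : Int) + 1 := by omega
        have hCiff := wCond_iff c (((rest.takeWhile (fun d => d == c)).length : Int) + 1) hLpos q
        constructor
        · rintro (⟨p, hp, hcp⟩ | hm)
          · rcases (PySem.Dict.mem_items_insert d _ _ _).mp hp with rfl | ⟨hpd, _⟩
            · rcases hCiff.mp hcp with ⟨k, hk, hx⟩
              exact Or.inr (Or.inl ⟨k, by omega, hx⟩)
            · exact Or.inl ⟨p, hpd, hcp⟩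
          · exact Or.inr (Or.inr hm)
        · rintro (⟨p, hp, hcp⟩ | ⟨k, hk, hx⟩ | hm)
          · by_cases hpc : p.1 = c
            · have hval : d.getD p.1 0 = p.2 := by
                obtain ⟨pk, pv⟩ := p
                exact PySem.Dict.getD_of_mem_items d hp hnd 0
              refine Or.inl ⟨(c, ((rest.takeWhile (fun d => d == c)).length : Int) + 1),
                PySem.Dict.mem_items_insert_self d _ _, ?_⟩
              have hle : p.2 ≤ ((rest.takeWhile (fun d => d == c)).length : Int) + 1 := by
                rw [← hval, hpc]; omega
              have := wCond_mono p.1 p.2 (((rest.takeWhile (fun d => d == c)).length : Int) + 1) q hle hcp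
              rw [hpc] at this
              exact this
            · exact Or.inl ⟨p, (PySem.Dict.mem_items_insert d _ _ _).mpr (Or.inr ⟨hp, hpc⟩), hcp⟩
          · refine Or.inl ⟨(c, ((rest.takeWhile (fun d => d == c)).length : Int) + 1),
              PySem.Dict.mem_items_insert_self d _ _, ?_⟩
            exact hCiff.mpr ⟨k, by omega, hx⟩
          · exact Or.inr hm
      · rw [if_neg hins]
        rw [ih d hnd]
        constructor
        · rintro (h | hm)
          · exact Or.inl h
          · exact Or.inr (Or.inr hm)
        · rintro (h | ⟨k, hk, hx⟩ | hm)
          · exact Or.inl h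
          · -- the run is dominated by the stored maximum for c
            have hw : (1 : Int) ≤ d.getD c 0 := by omega
            have hcont : d.contains c = true := by
              by_contra hnc
              have : d.getD c 0 = 0 :=
                PySem.Dict.getD_of_not_contains d 0 (by simpa using hnc)
              omega
            have hsome : (d.get? c).isSome := by
              rw [← PySem.Dict.contains_eq_isSome_get? d c]; exact hcont
            obtain ⟨w, hwget⟩ := Option.isSome_iff_exists.mp hsome
            have hwD : d.getD c 0 = w := PySem.Dict.getD_of_get?_eq_some d 0 hwget
            have hmem : (c, w) ∈ d.items := PySem.Dict.mem_items_of_get?_eq_some d hwget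
            refine Or.inl ⟨(c, w), hmem, ?_⟩
            rw [wCond_iff c w (by omega) q]
            exact ⟨k, by omega, hx⟩
          · exact Or.inr hm

-- ===== VERDICT (by name: the statement is the Claim_ definition above) =====
theorem weightedUniformStrings_spec : Claim_equal_weightedUniformStrings := by
  intro s queries _ hpre
  unfold Spec_weightedUniformStrings weightedUniformStrings weightedUniformStrings_alt
  rcases hs : s.toList with _ | ⟨c, rest⟩
  · exact absurd (String.toList_eq_nil_iff.mp hs) hpre
  · apply List.map_congr_left
    intro q _
    have hA : q ∈ wA_loop c (rest ++ ['_']) ((c.toNat : Int) - 96) PySem.Set.empty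
        ↔ q ∈ multsB (runsB (c :: rest)) := by
      rw [mem_wA_loop]
      have h := contribA_runs rest c 0 q
      rw [show (0:Nat) + 1 = 1 from rfl, List.replicate_one, List.singleton_append] at h
      rw [show (((0:Nat):Int) + 1) * ((c.toNat : Int) - 96) = (c.toNat : Int) - 96 by norm_num] at h
      have hempty : q ∉ (PySem.Set.empty : PySem.Set Int) := by simp [PySem.Set.empty]
      constructor
      · rintro (h0 | hc)
        · exact absurd h0 hempty
        · exact h.mp (Or.inl hc)
      · intro hm
        rcases h.mpr hm with h' | ⟨k, hk, _⟩
        · exact Or.inr h'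
        · exact absurd hk (Nat.not_lt_zero k)
    have hB : wB_ach q (wB_runs (c :: rest) PySem.Dict.empty).items = true
        ↔ q ∈ multsB (runsB (c :: rest)) := by
      rw [wB_ach_iff_exists, wB_runs_cond_aux (c :: rest).length (c :: rest) le_rfl
        PySem.Dict.empty q
        (PySem.Dict.nodup_keys_empty (κ := Char) (ν := Int))]
      constructor
      · rintro (⟨p, hp, _⟩ | hm)
        · simp [PySem.Dict.empty] at hp
        · exact hm
      · exact Or.inr
    by_cases hq : PySem.Set.contains (wA_loop c (rest ++ ['_']) ((c.toNat : Int) - 96) PySem.Set.empty) q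
    · rw [if_pos hq, if_pos]
      rw [PySem.Set.contains_iff] at hq
      exact hB.mpr (hA.mp hq)
    · rw [if_neg hq, if_neg]
      rw [PySem.Set.contains_iff] at hq
      intro hb
      exact hq (hA.mpr (hB.mp hb))
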